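-- pv_equiv track=rewrite | github.com/bp117/SmartAppv1 | ocr-comp.py | extract_key_value_pairs
-- ===== SOURCE A (Python) =====
-- def extract_key_value_pairs(spans):
--     pairs = []
--     key_candidate = None
--
--     # Example simplistic pairing based on proximity and sequence
--     for span in spans:
--         if ":" in span[1] or "Date" in span[1]:
--             key_candidate = span
--         elif key_candidate:
--             # Assuming a key is immediately followed by its value in the JSON structure
--             pairs.append((key_candidate, span))
--             key_candidate = None  # Reset key candidate after pairing
--     return pairs
-- ===== SOURCE B (Python) =====
-- from itertools import groupby
--
-- def extract_key_value_pairs(spans):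
--     def is_key(span):
--         return ":" in span[1] or "Date" in span[1]
--     pairs = []
--     pending = None
--     for k, grp in groupby(spans, key=is_key):
--         run = list(grp)
--         if k:
--             pending = run[-1]
--         elif pending is not None:
--             pairs.append((pending, run[0]))
--             pending = None
--     return pairs
-- ===== Notes on version B (the rewrite author's own statement) =====
-- stated objective: alternative
-- what changed: B folds the stream into maximal runs of keys/non-keys with itertools.groupby and pairs the last key of a key-run with the first span of the following non-key run, instead of A's element-by-element scan with an overwritten candidate variable.
import Mathlib
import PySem

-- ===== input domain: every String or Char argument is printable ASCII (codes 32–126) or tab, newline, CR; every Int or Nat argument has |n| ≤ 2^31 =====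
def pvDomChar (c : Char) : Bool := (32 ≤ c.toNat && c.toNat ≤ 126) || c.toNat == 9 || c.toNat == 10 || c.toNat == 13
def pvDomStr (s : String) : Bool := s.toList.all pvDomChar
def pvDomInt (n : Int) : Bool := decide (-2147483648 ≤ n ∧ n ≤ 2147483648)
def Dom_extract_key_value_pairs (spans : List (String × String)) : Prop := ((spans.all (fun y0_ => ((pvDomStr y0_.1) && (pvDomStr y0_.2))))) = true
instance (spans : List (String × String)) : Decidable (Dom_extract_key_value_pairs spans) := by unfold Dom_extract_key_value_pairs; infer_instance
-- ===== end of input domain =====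

-- B groups the span stream into maximal key/non-key runs (itertools.groupby) and pairs the
-- last key of a key-run with the first span of the following non-key run (alternative decomposition, same cost).


-- ===== PORT A =====
-- element-by-element scan keeping (pairs so far, current key candidate)
def extract_key_value_pairs (spans : List (String × String)) : List ((String × String) × (String × String)) :=
  (spans.foldl
    (fun (st : List ((String × String) × (String × String)) × Option (String × String)) span =>
      if PySem.Str.isIn ":" span.2 || PySem.Str.isIn "Date" span.2 then
        (st.1, some span)
      else
        match st.2 with
        | some k => (st.1 ++ [(k, span)], none)
        | none   => st)
    ([], none)).1

-- ===== PORT B =====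
-- is_key predicate from Source B
def pvIsKey (span : String × String) : Bool :=
  PySem.Str.isIn ":" span.2 || PySem.Str.isIn "Date" span.2

-- groupby(spans, key=is_key): maximal runs of equal is_key, each run kept as (flag, head, tail)
def pvGroupRuns : List (String × String) → List (Bool × (String × String) × List (String × String))
  | [] => []
  | s :: rest =>
    match pvGroupRuns rest with
    | (k, h, t) :: gs =>
      if pvIsKey s = k then (k, s, h :: t) :: gs
      else (pvIsKey s, s, []) :: (k, h, t) :: gs
    | [] => [(pvIsKey s, s, [])]

-- walk the runs: a key-run sets pending to its last span; a non-key run pairs pending with its first span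
def pvWalk : List (Bool × (String × String) × List (String × String)) →
    Option (String × String) → List ((String × String) × (String × String))
  | [], _ => []
  | (k, h, t) :: gs, pending =>
    if k then pvWalk gs (some (t.getLastD h))
    else
      match pending with
      | some c => (c, h) :: pvWalk gs none
      | none   => pvWalk gs none

def extract_key_value_pairs_alt (spans : List (String × String)) : List ((String × String) × (String × String)) :=
  pvWalk (pvGroupRuns spans) none

-- ===== PRECONDITION & SPEC =====
def Spec_extract_key_value_pairs (spans : List (String × String)) (out : List ((String × String) × (String × String))) : Prop := out = extract_key_value_pairs_alt spans
instance (spans : List (String × String)) (out : List ((String × String) × (String × String))) : Decidable (Spec_extract_key_value_pairs spans out) := by unfold Spec_extract_key_value_pairs; infer_instance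

-- ===== CLAIM (what is proved, stated in full; the proofs are below) =====
def Claim_equal_extract_key_value_pairs : Prop := ∀ (spans : List (String × String)), Dom_extract_key_value_pairs spans → Spec_extract_key_value_pairs spans (extract_key_value_pairs spans)

-- ===== LEMMAS AND PROOFS =====

-- reference recursion: A's scan without the accumulator
def pvGoA : List (String × String) → Option (String × String) → List ((String × String) × (String × String))
  | [], _ => []
  | s :: rest, cand =>
    if pvIsKey s then pvGoA rest (some s)
    else
      match cand with
      | some k => (k, s) :: pvGoA rest none
      | none   => pvGoA rest none

theorem foldA_eq_goA (l : List (String × String))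
    (pairs : List ((String × String) × (String × String))) (cand : Option (String × String)) :
    (l.foldl
      (fun (st : List ((String × String) × (String × String)) × Option (String × String)) span =>
        if PySem.Str.isIn ":" span.2 || PySem.Str.isIn "Date" span.2 then
          (st.1, some span)
        else
          match st.2 with
          | some k => (st.1 ++ [(k, span)], none)
          | none   => st)
      (pairs, cand)).1 = pairs ++ pvGoA l cand := by
  induction l generalizing pairs cand with
  | nil => simp [pvGoA]
  | cons s rest ih =>
    by_cases hk : pvIsKey s = true
    · simp only [List.foldl_cons, pvGoA]
      rw [if_pos (by simpa [pvIsKey] using hk), if_pos hk, ih]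
    · cases cand with
      | some k =>
        simp only [List.foldl_cons, pvGoA]
        rw [if_neg (by simpa [pvIsKey] using hk), if_neg hk, ih]
        simp
      | none =>
        simp only [List.foldl_cons, pvGoA]
        rw [if_neg (by simpa [pvIsKey] using hk), if_neg hk, ih]

theorem pvGetD_of_ne_nil {A : Type} (l : List A) (hl : l ≠ []) (a b : A) :
    l.getLast?.getD a = l.getLast?.getD b := by
  cases h : l.getLast? with
  | none => exact absurd (List.getLast?_eq_none_iff.mp h) hl
  | some x => rfl

theorem walk_groupRuns_cons (s : String × String) (rest : List (String × String))
    (cand : Option (String × String)) :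
    pvWalk (pvGroupRuns (s :: rest)) cand =
      if pvIsKey s then pvWalk (pvGroupRuns rest) (some s)
      else
        match cand with
        | some c => (c, s) :: pvWalk (pvGroupRuns rest) none
        | none   => pvWalk (pvGroupRuns rest) none := by
  cases hg : pvGroupRuns rest with
  | nil =>
    by_cases hk : pvIsKey s = true <;>
      cases cand <;> simp [pvGroupRuns, hg, pvWalk, hk]
  | cons g gs =>
    obtain ⟨k, h, t⟩ := g
    by_cases hk : pvIsKey s = true
    · by_cases hkk : k = true
      · subst hkk
        cases t with
        | nil => simp [pvGroupRuns, hg, pvWalk, hk]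
        | cons b l =>
          simp [pvGroupRuns, hg, pvWalk, hk, pvGetD_of_ne_nil (b :: l) (by simp) s h]
      · have hkf : k = false := by simpa using hkk
        subst hkf
        simp [pvGroupRuns, hg, pvWalk, hk]
    · have hkf : pvIsKey s = false := by simpa using hk
      by_cases hkk : k = true
      · subst hkk
        cases cand <;> simp [pvGroupRuns, hg, pvWalk, hkf]
      · have hkf2 : k = false := by simpa using hkk
        subst hkf2
        cases cand <;> simp [pvGroupRuns, hg, pvWalk, hkf]

theorem walk_eq_goA (l : List (String × String)) (cand : Option (String × String)) :
    pvWalk (pvGroupRuns l) cand = pvGoA l cand := by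
  induction l generalizing cand with
  | nil => simp [pvGroupRuns, pvWalk, pvGoA]
  | cons s rest ih =>
    rw [walk_groupRuns_cons]
    by_cases hk : pvIsKey s = true
    · simp [pvGoA, hk, ih]
    · cases cand <;> simp [pvGoA, hk, ih]

-- ===== VERDICT (by name: the statement is the Claim_ definition above) =====
theorem extract_key_value_pairs_spec : Claim_equal_extract_key_value_pairs := by
  intro spans _
  unfold Spec_extract_key_value_pairs extract_key_value_pairs extract_key_value_pairs_alt
  rw [foldA_eq_goA, walk_eq_goA]
  simp
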